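-- pv_equiv track=rewrite | github.com/Catarinacpns/A-Lung-Cancer-DL-Pipeline-for-Classification-TNM-Staging-and-Treatment-Protocol-Generation | src/utils/subject_utils.py | sample_patients
-- ===== SOURCE A (Python) =====
-- def sample_patients(patient_images, target_images):
--     """Seleciona pacientes até atingir o número desejado de imagens."""
--     selected_patients = []
--     selected_images = []
--     sorted_patients = sorted(patient_images.items(), key=lambda x: len(x[1]))
--     total_images = 0
--
--     for patient_id, images in sorted_patients:
--         if total_images >= target_images:
--             break
--         selected_patients.append(patient_id)
--         selected_images.extend(images)
--         total_images += len(images)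
--
--     return selected_patients, selected_images
-- ===== SOURCE B (Python) =====
-- def sample_patients(patient_images, target_images):
--     """Seleciona pacientes até atingir o número desejado de imagens.
--
--     Two-pass re-implementation: sort by image count, compute cumulative
--     prefix sums to find the cutoff index k, then build both outputs by
--     slicing/flattening the prefix."""
--     sp = sorted(patient_images.items(), key=lambda x: len(x[1]))
--     cums = [0]
--     for _, imgs in sp:
--         cums.append(cums[-1] + len(imgs))
--     k = next((i for i in range(len(sp)) if cums[i] >= target_images), len(sp))
--     selected_patients = [pid for pid, _ in sp[:k]]
--     selected_images = [img for _, imgs in sp[:k] for img in imgs]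
--     return selected_patients, selected_images
-- ===== Notes on version B (the rewrite author's own statement) =====
-- stated objective: alternative
-- what changed: Replaces A's single interleaved accumulate-and-break loop with a two-pass decomposition: a prefix-sum scan finds the cutoff index k, then the outputs are built by slicing the sorted list and mapping/flattening it.
import Mathlib
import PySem

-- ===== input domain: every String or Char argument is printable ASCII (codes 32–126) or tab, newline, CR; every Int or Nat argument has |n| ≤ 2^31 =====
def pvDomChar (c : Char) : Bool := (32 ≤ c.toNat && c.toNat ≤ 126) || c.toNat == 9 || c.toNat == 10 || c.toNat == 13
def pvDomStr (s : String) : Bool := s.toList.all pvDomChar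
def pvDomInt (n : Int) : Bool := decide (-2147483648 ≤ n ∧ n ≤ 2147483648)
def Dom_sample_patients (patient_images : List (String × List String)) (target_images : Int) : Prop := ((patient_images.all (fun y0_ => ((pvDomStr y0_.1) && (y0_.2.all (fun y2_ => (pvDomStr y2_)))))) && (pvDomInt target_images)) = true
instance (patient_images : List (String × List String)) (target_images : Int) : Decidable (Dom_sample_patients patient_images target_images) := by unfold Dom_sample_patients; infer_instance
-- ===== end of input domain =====

-- B replaces A's single interleaved accumulate-and-break loop by a cutoff-index
-- computation over prefix sums followed by slice/map/flatten (objective: alternative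
-- decomposition; same cost). Equivalence of the RETURN values is proved for all inputs.

-- ===== PORT A =====
-- the for-loop of A: state = (selected_patients, selected_images, total_images), break when total ≥ target
def pvLoopA : List (String × List String) → Int → Int → List String → List String → List String × List String
  | [], _, _, selP, selI => (selP, selI)
  | (pid, imgs) :: rest, total, target, selP, selI =>
    if target ≤ total then (selP, selI)
    else pvLoopA rest (total + imgs.length) target (selP ++ [pid]) (selI ++ imgs)

def sample_patients (patient_images : List (String × List String)) (target_images : Int) : List String × List String :=
  pvLoopA (PySem.List.sorted patient_images (fun x => x.2.length) false) 0 target_images [] []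

-- ===== PORT B =====
-- cums = [0] extended with running sums (Source B's first loop, as a structural scan)
def pvCums : Int → List (String × List String) → List Int
  | c, [] => [c]
  | c, p :: rest => c :: pvCums (c + p.2.length) rest

-- k = first index with cums[i] ≥ target, else past the end (List.take clamps, as Python slicing does)
def pvFindK : List Int → Int → Nat
  | [], _ => 0
  | c :: rest, t => if t ≤ c then 0 else 1 + pvFindK rest t

def sample_patients_alt (patient_images : List (String × List String)) (target_images : Int) : List String × List String :=
  let sp := PySem.List.sorted patient_images (fun x => x.2.length) false
  let k := pvFindK (pvCums 0 sp) target_images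
  ((sp.take k).map Prod.fst, (sp.take k).flatMap Prod.snd)

-- ===== PRECONDITION & SPEC =====
def Spec_sample_patients (patient_images : List (String × List String)) (target_images : Int) (out : List String × List String) : Prop := out = sample_patients_alt patient_images target_images
instance (patient_images : List (String × List String)) (target_images : Int) (out : List String × List String) : Decidable (Spec_sample_patients patient_images target_images out) := by unfold Spec_sample_patients; infer_instance

-- ===== CLAIM (what is proved, stated in full; the proofs are below) =====
def Claim_equal_sample_patients : Prop := ∀ (patient_images : List (String × List String)) (target_images : Int), Dom_sample_patients patient_images target_images → Spec_sample_patients patient_images target_images (sample_patients patient_images target_images)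

-- ===== LEMMAS AND PROOFS =====
lemma pvLoopA_eq (l : List (String × List String)) : ∀ (c t : Int) (sP sI : List String),
    pvLoopA l c t sP sI =
      (sP ++ (l.take (pvFindK (pvCums c l) t)).map Prod.fst,
       sI ++ (l.take (pvFindK (pvCums c l) t)).flatMap Prod.snd) := by
  induction l with
  | nil => intro c t sP sI; simp [pvLoopA, pvCums, pvFindK]
  | cons p rest ih =>
    intro c t sP sI
    obtain ⟨pid, imgs⟩ := p
    simp only [pvLoopA, pvCums, pvFindK]
    split
    · simp
    · rw [ih, Nat.add_comm 1]
      simp [List.take_succ_cons, List.append_assoc]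

-- ===== VERDICT (by name: the statement is the Claim_ definition above) =====
theorem sample_patients_spec : Claim_equal_sample_patients := by
  intro pi t _
  unfold Spec_sample_patients sample_patients sample_patients_alt
  rw [pvLoopA_eq]
  simp
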